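-- pv_equiv track=rewrite | github.com/VidaGallo/ThesisModBus | src/utils/heuristic_additional_fun.py | split_ignored_and_active_ks
-- ===== SOURCE A (Python) =====
-- def split_ignored_and_active_ks(labels_event: dict, cluster_ks):
--     """
--     ignored_ks: k se almeno uno tra (k,'P') o (k,'D') è -1
--     active_ks : k clusterizzati con P e D entrambi != -1
--     """
--     cluster_set = set(int(k) for k in cluster_ks)
--     status = {}  # k -> set dei label visti (es. {-1, 2})
--
--     for (k, typ), c in labels_event.items():
--         k = int(k)
--         if k not in cluster_set:
--             continue
--         status.setdefault(k, set()).add(int(c))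
--
--     ignored = []
--     active = []
--
--     for k, labels in status.items():
--         if -1 in labels:
--             ignored.append(k)
--         else:
--             active.append(k)
--
--     return sorted(ignored), sorted(active)
-- ===== SOURCE B (Python) =====
-- def split_ignored_and_active_ks(labels_event: dict, cluster_ks):
--     cluster_set = set(int(k) for k in cluster_ks)
--     keys = sorted({int(k) for (k, typ) in labels_event if int(k) in cluster_set})
--     def has_bad(k):
--         return any(int(k2) == k and int(c) == -1 for (k2, typ), c in labels_event.items())
--     return [k for k in keys if has_bad(k)], [k for k in keys if not has_bad(k)]
-- ===== Notes on version B (the rewrite author's own statement) =====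
-- stated objective: alternative
-- what changed: Instead of accumulating per-key state during a pass over labels_event (A's dict-of-label-sets plus a partition loop), B first computes the sorted distinct in-cluster keys, then partitions that sorted list by re-querying labels_event with a per-key any() predicate; no state is accumulated and no post-sort is needed.
import Mathlib
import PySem

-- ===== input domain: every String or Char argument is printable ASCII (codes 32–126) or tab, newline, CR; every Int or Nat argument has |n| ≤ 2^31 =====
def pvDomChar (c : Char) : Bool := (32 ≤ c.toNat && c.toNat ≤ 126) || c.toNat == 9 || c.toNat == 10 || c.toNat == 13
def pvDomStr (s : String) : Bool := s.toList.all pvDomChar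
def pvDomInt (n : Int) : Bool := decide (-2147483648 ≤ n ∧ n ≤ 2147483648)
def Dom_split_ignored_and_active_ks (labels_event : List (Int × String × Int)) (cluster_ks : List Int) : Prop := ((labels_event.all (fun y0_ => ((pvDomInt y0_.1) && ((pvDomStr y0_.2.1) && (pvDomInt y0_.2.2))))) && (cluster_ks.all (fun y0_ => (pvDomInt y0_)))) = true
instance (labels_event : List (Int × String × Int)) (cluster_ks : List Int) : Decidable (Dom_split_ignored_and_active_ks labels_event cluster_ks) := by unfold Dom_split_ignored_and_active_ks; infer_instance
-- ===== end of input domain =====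

-- B drops A's accumulated dict-of-label-sets entirely: it sorts the distinct in-cluster
-- keys once and partitions that sorted list by a per-key any() query over labels_event
-- (objective: alternative decomposition); equal return value on every input.

-- ===== PORT A =====
-- status.setdefault(k, set()).add(int(c)) is Dict.modify k ∅ (·.add c): same placement
-- (existing key keeps its position, new key appends) and same resulting value.
def split_ignored_and_active_ks (labels_event : List (Int × String × Int)) (cluster_ks : List Int) : List Int × List Int :=
  let cluster_set : PySem.Set Int := PySem.Set.ofList cluster_ks
  let status : PySem.Dict Int (PySem.Set Int) :=
    labels_event.foldl (fun d e =>
      if !(PySem.Set.contains cluster_set e.1) then d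
      else d.modify e.1 PySem.Set.empty (fun s => PySem.Set.add s e.2.2)) PySem.Dict.empty
  let pr : List Int × List Int :=
    status.items.foldl (fun p kv =>
      if PySem.Set.contains kv.2 (-1) then (p.1 ++ [kv.1], p.2) else (p.1, p.2 ++ [kv.1]))
      ([], [])
  (PySem.List.sorted pr.1 (fun x => x) false, PySem.List.sorted pr.2 (fun x => x) false)

-- ===== PORT B =====
-- has_bad(k) = any(int(k2) == k and int(c) == -1 for (k2, typ), c in labels_event.items())
def pv_has_bad (labels_event : List (Int × String × Int)) (k : Int) : Bool :=
  labels_event.any (fun e => e.1 == k && e.2.2 == -1)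

def split_ignored_and_active_ks_alt (labels_event : List (Int × String × Int)) (cluster_ks : List Int) : List Int × List Int :=
  let cluster_set : PySem.Set Int := PySem.Set.ofList cluster_ks
  let keys : List Int :=
    PySem.List.sorted
      (PySem.Set.ofList ((labels_event.filter (fun e => PySem.Set.contains cluster_set e.1)).map (·.1)))
      (fun x => x) false
  (keys.filter (fun k => pv_has_bad labels_event k),
   keys.filter (fun k => !pv_has_bad labels_event k))

-- ===== PRECONDITION & SPEC =====
def Spec_split_ignored_and_active_ks (labels_event : List (Int × String × Int)) (cluster_ks : List Int) (out : List Int × List Int) : Prop := out = split_ignored_and_active_ks_alt labels_event cluster_ks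
instance (labels_event : List (Int × String × Int)) (cluster_ks : List Int) (out : List Int × List Int) : Decidable (Spec_split_ignored_and_active_ks labels_event cluster_ks out) := by unfold Spec_split_ignored_and_active_ks; infer_instance

-- ===== CLAIM (what is proved, stated in full; the proofs are below) =====
def Claim_equal_split_ignored_and_active_ks : Prop := ∀ (labels_event : List (Int × String × Int)) (cluster_ks : List Int), Dom_split_ignored_and_active_ks labels_event cluster_ks → Spec_split_ignored_and_active_ks labels_event cluster_ks (split_ignored_and_active_ks labels_event cluster_ks)

-- ===== LEMMAS AND PROOFS =====

theorem pv_memD (m : List (Int × String × Int)) (d : PySem.Dict Int (PySem.Set Int)) (k c : Int) :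
    c ∈ (m.foldl (fun d e => d.modify e.1 PySem.Set.empty (fun s => PySem.Set.add s e.2.2)) d).getD k PySem.Set.empty
      ↔ c ∈ d.getD k PySem.Set.empty ∨ ∃ e ∈ m, e.1 = k ∧ e.2.2 = c := by
  induction m generalizing d with
  | nil => simp
  | cons e m ih =>
    simp only [List.foldl_cons, ih, PySem.Dict.getD_modify, List.mem_cons]
    by_cases hk : k = e.1
    · subst hk
      simp [PySem.Set.mem_add]
      tauto
    · rw [if_neg hk]
      constructor
      · rintro (h | ⟨e', he', h1, h2⟩)
        · tauto
        · exact Or.inr ⟨e', Or.inr he', h1, h2⟩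
      · rintro (h | ⟨e', (rfl | he'), h1, h2⟩)
        · tauto
        · exact absurd h1 (fun h => hk h.symm)
        · exact Or.inr ⟨e', he', h1, h2⟩

-- two ≤-sorted duplicate-free Int lists with the same members are equal
theorem pv_eq_of_mem (xs ys : List Int) (hx : xs.Nodup) (hy : ys.Nodup)
    (hxs : xs.Pairwise (fun a b => a ≤ b)) (hys : ys.Pairwise (fun a b => a ≤ b))
    (h : ∀ k, k ∈ xs ↔ k ∈ ys) : xs = ys :=
  ((List.perm_ext_iff_of_nodup hx hy).mpr h).eq_of_pairwise (fun a b _ _ h1 h2 => le_antisymm h1 h2) hxs hys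

theorem pv_main : ∀ (labels_event : List (Int × String × Int)) (cluster_ks : List Int),
    split_ignored_and_active_ks labels_event cluster_ks = split_ignored_and_active_ks_alt labels_event cluster_ks := by
  intro l ks
  unfold split_ignored_and_active_ks split_ignored_and_active_ks_alt
  dsimp only
  set C : PySem.Set Int := PySem.Set.ofList ks with hC
  -- A's dict loop over the filtered list
  have hstepA : (fun (d : PySem.Dict Int (PySem.Set Int)) (e : Int × String × Int) =>
      if !(PySem.Set.contains C e.1) then d
      else d.modify e.1 PySem.Set.empty (fun s => PySem.Set.add s e.2.2)) =
      (fun d e => if PySem.Set.contains C e.1 then d.modify e.1 PySem.Set.empty (fun s => PySem.Set.add s e.2.2) else d) := by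
    funext d e; cases PySem.Set.contains C e.1 <;> simp
  rw [hstepA, PySem.List.foldl_if_eq_foldl_filter]
  set m : List (Int × String × Int) := l.filter (fun e => PySem.Set.contains C e.1) with hm
  set status : PySem.Dict Int (PySem.Set Int) :=
    m.foldl (fun d e => d.modify e.1 PySem.Set.empty (fun s => PySem.Set.add s e.2.2)) PySem.Dict.empty with hstatus
  -- keys of status = the distinct first-occurrence in-cluster keys (B's set)
  have hkeys : status.keys = PySem.Set.ofList (m.map (·.1)) := by
    rw [hstatus]
    rw [PySem.Dict.keys_foldl_modify_key m (·.1) PySem.Set.empty (fun _ e => fun s => PySem.Set.add s e.2.2) PySem.Dict.empty]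
    rw [PySem.Dict.keys_empty]
    exact PySem.Set.update_empty _
  have hnd : status.keys.Nodup := by rw [hkeys]; exact PySem.Set.nodup_ofList _
  -- A's partition loop is two filters over the key list
  have hstepP : (fun (p : List Int × List Int) (kv : Int × PySem.Set Int) =>
      if PySem.Set.contains kv.2 (-1) then (p.1 ++ [kv.1], p.2) else (p.1, p.2 ++ [kv.1])) =
      (fun p kv => (if PySem.Set.contains kv.2 (-1) then p.1 ++ [kv.1] else p.1,
                    if !(PySem.Set.contains kv.2 (-1)) then p.2 ++ [kv.1] else p.2)) := by
    funext p kv; cases PySem.Set.contains kv.2 (-1) <;> simp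
  rw [hstepP,
      PySem.List.foldl_prod_mk
        (f := fun (acc : List Int) (kv : Int × PySem.Set Int) => if PySem.Set.contains kv.2 (-1) then acc ++ [kv.1] else acc)
        (g := fun (acc : List Int) (kv : Int × PySem.Set Int) => if !(PySem.Set.contains kv.2 (-1)) then acc ++ [kv.1] else acc),
      PySem.List.foldl_append_if, PySem.List.foldl_append_if]
  rw [PySem.Dict.items_eq_map_keys status hnd PySem.Set.empty]
  rw [List.filter_map, List.filter_map, List.map_map, List.map_map]
  simp only [Function.comp_def, List.map_id', List.nil_append]
  -- B's sorted key list
  set K : List Int := PySem.List.sorted (PySem.Set.ofList (m.map (·.1))) (fun x => x) false with hK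
  have hKlt : K.Pairwise (fun a b => a < b) := PySem.List.sorted_ofList_pairwise_lt _
  have hKnd : K.Nodup := by
    rw [List.nodup_iff_pairwise_ne]; exact hKlt.imp ne_of_lt
  have hKmem : ∀ k, k ∈ K ↔ k ∈ status.keys := by
    intro k; rw [hK, PySem.List.mem_sorted, hkeys]
  -- membership facts
  have memSeen : ∀ k, k ∈ status.keys ↔ ∃ e ∈ l, PySem.Set.contains C e.1 = true ∧ e.1 = k := by
    intro k
    rw [hkeys, PySem.Set.mem_ofList, hm]
    simp [List.mem_filter]
  have memD : ∀ k c, c ∈ status.getD k PySem.Set.empty ↔ ∃ e ∈ l, PySem.Set.contains C e.1 = true ∧ e.1 = k ∧ e.2.2 = c := by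
    intro k c
    rw [hstatus, pv_memD]
    simp only [PySem.Dict.getD_empty]
    rw [hm]
    simp [List.mem_filter]
  -- on the keys of status, A's per-key test agrees with B's has_bad query
  have htest : ∀ k ∈ status.keys,
      PySem.Set.contains (status.getD k PySem.Set.empty) (-1) = pv_has_bad l k := by
    intro k hk
    rcases (memSeen k).mp hk with ⟨e0, he0, hc0, hk0⟩
    have hck : PySem.Set.contains C k = true := hk0 ▸ hc0
    unfold pv_has_bad
    rw [Bool.eq_iff_iff, PySem.Set.contains_iff, memD, List.any_eq_true]
    constructor
    · rintro ⟨e, he, h1, h2, h3⟩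
      exact ⟨e, he, by simp [h2, h3]⟩
    · rintro ⟨e, he, hb⟩
      have h2 : e.1 = k ∧ e.2.2 = -1 := by
        simpa using hb
      exact ⟨e, he, h2.1 ▸ hck, h2.1, h2.2⟩
  -- each component: both sides are ≤-sorted nodup lists with the same members
  refine Prod.ext ?_ ?_ <;> dsimp only
  · apply pv_eq_of_mem
    · exact (PySem.List.sorted_perm _ _ _).nodup_iff.mpr (List.Nodup.filter _ hnd)
    · exact hKnd.filter _
    · exact PySem.List.sorted_pairwise _ _
    · exact (hKlt.filter _).imp le_of_lt
    · intro k
      rw [PySem.List.mem_sorted, List.mem_filter, List.mem_filter, hKmem]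
      constructor
      · rintro ⟨hk, hp⟩
        exact ⟨hk, (htest k hk) ▸ hp⟩
      · rintro ⟨hk, hp⟩
        exact ⟨hk, (htest k hk) ▸ hp⟩
  · apply pv_eq_of_mem
    · exact (PySem.List.sorted_perm _ _ _).nodup_iff.mpr (List.Nodup.filter _ hnd)
    · exact hKnd.filter _
    · exact PySem.List.sorted_pairwise _ _
    · exact (hKlt.filter _).imp le_of_lt
    · intro k
      rw [PySem.List.mem_sorted, List.mem_filter, List.mem_filter, hKmem]
      constructor
      · rintro ⟨hk, hp⟩
        exact ⟨hk, by rw [← htest k hk]; exact hp⟩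
      · rintro ⟨hk, hp⟩
        exact ⟨hk, by rw [htest k hk]; exact hp⟩

-- ===== VERDICT (by name: the statement is the Claim_ definition above) =====
theorem split_ignored_and_active_ks_spec : Claim_equal_split_ignored_and_active_ks := by
  intro labels_event cluster_ks _
  unfold Spec_split_ignored_and_active_ks
  exact pv_main labels_event cluster_ks
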